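-- pv_equiv track=rewrite | github.com/suolun/HC-Store_VLDB | 3_plot copy 6.py | get_binary_group_info
-- ===== SOURCE A (Python) =====
-- def get_binary_group_info(n):
--     if n == 0:
--         return 0, []
--     binary_str = bin(n)[2:]
--     group_sizes = []
--     for i, bit in enumerate(binary_str):
--         if bit == '1':
--             group_sizes.append(1 << (len(binary_str) - 1 - i))
--     return len(group_sizes), group_sizes
-- ===== SOURCE B (Python) =====
-- def get_binary_group_info(n):
--     m = abs(n)
--     groups = []
--     p = 1
--     while m:
--         if m & 1:
--             groups.append(p)
--         m >>= 1
--         p <<= 1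
--     groups.reverse()
--     return len(groups), groups
-- ===== Notes on version B (the rewrite author's own statement) =====
-- stated objective: alternative
-- what changed: B extracts set bits arithmetically (LSB-first halving with a running power of two, then one reverse) instead of formatting a binary string with bin() and scanning it with enumerate/index arithmetic; abs(n) reproduces A's sign-insensitive result (the 'b' left by bin(n)[2:] on negatives never matches '1' and its offset cancels in the exponent).
import Mathlib
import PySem

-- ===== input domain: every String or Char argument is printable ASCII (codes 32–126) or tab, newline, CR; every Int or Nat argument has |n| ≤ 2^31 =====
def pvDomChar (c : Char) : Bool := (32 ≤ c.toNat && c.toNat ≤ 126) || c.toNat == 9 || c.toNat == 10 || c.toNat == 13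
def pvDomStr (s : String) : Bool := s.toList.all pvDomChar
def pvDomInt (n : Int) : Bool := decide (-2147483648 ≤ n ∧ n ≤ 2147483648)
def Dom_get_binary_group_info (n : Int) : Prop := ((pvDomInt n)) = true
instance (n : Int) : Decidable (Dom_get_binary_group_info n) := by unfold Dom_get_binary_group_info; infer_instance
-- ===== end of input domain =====

-- B replaces A's bin()-string scan by an arithmetic LSB-first set-bit extraction with a final reverse (alternative algorithm, same result).


-- ===== PORT A =====
-- hand port of bin(m) for m : Nat ('' for 0, else binary digits MSB first); exact step-for-step CPython digit recursion
def pvBinDigits (m : Nat) : List Char :=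
  if h : m = 0 then []
  else pvBinDigits (m / 2) ++ [if m % 2 = 1 then '1' else '0']
  termination_by m
  decreasing_by exact Nat.div_lt_self (Nat.pos_of_ne_zero h) one_lt_two

def get_binary_group_info (n : Int) : Int × List Int :=
  if n = 0 then (0, [])
  else
    -- bin(n)[2:]: for n > 0 the binary digits of n; for n < 0 bin(n) = '-0b…' and [2:] keeps 'b' ++ digits of |n|
    let binary_str : List Char := (if n < 0 then ['b'] else []) ++ pvBinDigits n.natAbs
    let group_sizes : List Int :=
      (PySem.List.enumerate binary_str).foldl
        (fun acc p =>
          if p.2 = '1' then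
            -- 1 << (len(binary_str) - 1 - i); the exponent is a nonnegative int (i < len), so Nat subtraction/toNat is exact
            acc ++ [((1 <<< (binary_str.length - 1 - p.1.toNat) : Nat) : Int)]
          else acc) []
    ((group_sizes.length : Int), group_sizes)

-- ===== PORT B =====
-- the while loop of Source B: m, p, groups are the loop state
def pvAltLoop (m : Nat) (p : Int) (groups : List Int) : List Int :=
  if h : m = 0 then groups
  else pvAltLoop (m >>> 1) (p <<< (1:Nat)) (if m &&& 1 = 1 then groups ++ [p] else groups)
  termination_by m
  decreasing_by simpa [Nat.shiftRight_one] using Nat.div_lt_self (Nat.pos_of_ne_zero h) one_lt_two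

def get_binary_group_info_alt (n : Int) : Int × List Int :=
  let m := n.natAbs
  let groups := (pvAltLoop m 1 []).reverse
  ((groups.length : Int), groups)

-- ===== PRECONDITION & SPEC =====
def Spec_get_binary_group_info (n : Int) (out : Int × List Int) : Prop := out = get_binary_group_info_alt n
instance (n : Int) (out : Int × List Int) : Decidable (Spec_get_binary_group_info n out) := by unfold Spec_get_binary_group_info; infer_instance

-- ===== CLAIM (what is proved, stated in full; the proofs are below) =====
def Claim_equal_get_binary_group_info : Prop := ∀ (n : Int), Dom_get_binary_group_info n → Spec_get_binary_group_info n (get_binary_group_info n)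

-- ===== LEMMAS AND PROOFS =====

-- canonical descending list of set-bit powers of two of m
def pvPows (m : Nat) : List Int :=
  if h : m = 0 then []
  else (pvPows (m / 2)).map (· * 2) ++ (if m % 2 = 1 then [1] else [])
  termination_by m
  decreasing_by exact Nat.div_lt_self (Nat.pos_of_ne_zero h) one_lt_two

-- A's filter/map form of the fold, with the string length as an explicit parameter
def pvWmap (t : List (Int × Char)) (L : Nat) : List Int :=
  (t.filter (fun p => decide (p.2 = '1'))).map
    (fun p => ((1 <<< (L - 1 - p.1.toNat) : Nat) : Int))

theorem pvWmap_append (t u : List (Int × Char)) (L : Nat) :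
    pvWmap (t ++ u) L = pvWmap t L ++ pvWmap u L := by
  simp [pvWmap]

-- shifting the start index and the length together leaves the weights unchanged
theorem pvWmap_shift (d : List Char) (s L : Nat) :
    pvWmap (PySem.List.enumerate d ((s : Int) + 1)) (L + 1)
      = pvWmap (PySem.List.enumerate d (s : Int)) L := by
  induction d generalizing s with
  | nil => simp [PySem.List.enumerate_nil, pvWmap]
  | cons c d ih =>
    have h1 : ((s : Int) + 1 + 1) = ((s + 1 : Nat) : Int) + 1 := by push_cast; ring
    have h2 : ((s : Int) + 1) = ((s + 1 : Nat) : Int) := by push_cast; ring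
    rw [PySem.List.enumerate_cons, PySem.List.enumerate_cons, h1, h2]
    have key := ih (s + 1)
    simp only [pvWmap] at key ⊢
    by_cases hc : c = '1'
    · simp only [List.filter_cons, hc, decide_true, ite_true, List.map_cons,
        Int.toNat_natCast]
      rw [key, show L + 1 - 1 - (s + 1) = L - 1 - s from by omega]
    · simp only [List.filter_cons, hc, decide_false]
      exact key

-- doubling the length doubles every weight (elements' indices are below the old length)
theorem pvWmap_succ (d : List Char) :
    pvWmap (PySem.List.enumerate d 0) (d.length + 1)
      = (pvWmap (PySem.List.enumerate d 0) d.length).map (· * 2) := by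
  simp only [pvWmap, List.map_map]
  apply List.map_congr_left
  intro p hp
  have hpmem : p ∈ PySem.List.enumerate d 0 := List.mem_of_mem_filter hp
  rcases (PySem.List.mem_enumerate_iff _ _ _).1 hpmem with ⟨k, hk, rfl⟩
  simp only [Function.comp_apply, Int.zero_add, Int.toNat_natCast]
  have he : d.length + 1 - 1 - k = (d.length - 1 - k) + 1 := by omega
  rw [he]
  simp [Nat.shiftLeft_succ, Nat.mul_comm]

-- A's weighted scan of the digit string is the canonical descending power list
theorem pvWmap_binDigits (m : Nat) :
    pvWmap (PySem.List.enumerate (pvBinDigits m) 0) (pvBinDigits m).length = pvPows m := by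
  induction m using Nat.strong_induction_on with
  | _ m ih =>
    by_cases h : m = 0
    · subst h; simp [pvBinDigits, pvPows, PySem.List.enumerate_nil, pvWmap]
    · rw [pvBinDigits, pvPows]
      simp only [h, dite_false]
      set d := pvBinDigits (m / 2) with hd
      have hlen : (d ++ [if m % 2 = 1 then '1' else '0']).length = d.length + 1 := by
        simp
      rw [PySem.List.enumerate_append, pvWmap_append, hlen]
      have ihm := ih (m / 2) (Nat.div_lt_self (Nat.pos_of_ne_zero h) one_lt_two)
      rw [pvWmap_succ, ihm]
      congr 1
      -- the last digit contributes [1] iff m is odd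
      have hm2 : m % 2 = 1 ∨ m % 2 = 0 := by omega
      rcases hm2 with h2 | h2 <;>
        simp [h2, pvWmap, PySem.List.enumerate_cons, PySem.List.enumerate_nil,
]

-- B's loop appends the ascending powers (scaled by p) to the accumulator
theorem pvAltLoop_eq (m : Nat) (p : Int) (acc : List Int) :
    pvAltLoop m p acc = acc ++ ((pvPows m).map (· * p)).reverse := by
  induction m using Nat.strong_induction_on generalizing p acc with
  | _ m ih =>
    by_cases h : m = 0
    · subst h; simp [pvAltLoop, pvPows]
    · rw [pvAltLoop, pvPows]
      simp only [h, dite_false]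
      rw [ih (m >>> 1) (by simpa [Nat.shiftRight_one] using
            Nat.div_lt_self (Nat.pos_of_ne_zero h) one_lt_two)]
      have hsr : m >>> 1 = m / 2 := Nat.shiftRight_one m
      have hand : m &&& 1 = m % 2 := Nat.and_one_is_mod m
      have hsl : (p <<< (1:Nat) : Int) = p * 2 := by
        rw [Int.shiftLeft_eq]; norm_num
      rw [hsr, hand, hsl]
      have hmap : (pvPows (m / 2)).map (· * (p * 2))
          = ((pvPows (m / 2)).map (· * 2)).map (· * p) := by
        simp only [List.map_map]
        apply List.map_congr_left
        intro x _
        simp only [Function.comp_apply]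
        ring
      have hm2 : m % 2 = 1 ∨ m % 2 = 0 := by omega
      rcases hm2 with h2 | h2 <;>
        simp [h2, hmap, List.reverse_append]

-- ===== VERDICT (by name: the statement is the Claim_ definition above) =====
theorem get_binary_group_info_spec : Claim_equal_get_binary_group_info := by
  intro n _
  show _ = _
  unfold get_binary_group_info get_binary_group_info_alt
  by_cases h0 : n = 0
  · subst h0
    simp [pvAltLoop]
  · simp only [h0, if_false]
    -- both group lists equal pvPows n.natAbs
    have hB : (pvAltLoop n.natAbs 1 []).reverse = pvPows n.natAbs := by
      rw [pvAltLoop_eq]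
      simp
    have hA :
        (PySem.List.enumerate ((if n < 0 then ['b'] else []) ++ pvBinDigits n.natAbs)).foldl
          (fun acc p =>
            if p.2 = '1' then
              acc ++ [((1 <<< (((if n < 0 then ['b'] else []) ++ pvBinDigits n.natAbs).length - 1 - p.1.toNat) : Nat) : Int)]
            else acc) []
          = pvPows n.natAbs := by
      rw [PySem.List.foldl_append_ite]
      show pvWmap (PySem.List.enumerate ((if n < 0 then ['b'] else []) ++ pvBinDigits n.natAbs) 0)
            ((if n < 0 then ['b'] else []) ++ pvBinDigits n.natAbs).length = _
      by_cases hneg : n < 0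
      · -- 'b' contributes nothing; the remaining indices are shifted by 1 and the length by 1
        simp only [hneg, if_true, List.singleton_append, List.length_cons]
        rw [PySem.List.enumerate_cons]
        have : pvWmap ((0, 'b') :: PySem.List.enumerate (pvBinDigits n.natAbs) (0 + 1))
            ((pvBinDigits n.natAbs).length + 1)
            = pvWmap (PySem.List.enumerate (pvBinDigits n.natAbs) ((0 : Nat) + 1))
                ((pvBinDigits n.natAbs).length + 1) := by
          simp [pvWmap]
        rw [this]
        rw [pvWmap_shift (pvBinDigits n.natAbs) 0 (pvBinDigits n.natAbs).length]
        exact pvWmap_binDigits n.natAbs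
      · simp only [hneg, if_false, List.nil_append]
        exact pvWmap_binDigits n.natAbs
    simp only [hA, hB]
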